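-- pv_equiv track=rewrite | github.com/super30admin/Hashing-3 | Favourite_Genres.py | getmostheardgenre
-- ===== SOURCE A (Python) =====
-- def getmostheardgenre(genrefreq):
--     mini=float('-inf')
--     genrelist=[]
--     for key,value in genrefreq.items():
--         count = value
--         if value>mini:
--             genrelist = []
--             mini=value
--             genrelist.append(key)
--         elif count==mini:
--             genrelist.append(key)
--     return genrelist
-- ===== SOURCE B (Python) =====
-- def getmostheardgenre(genrefreq):
--     if not genrefreq:
--         return []
--     m = max(genrefreq.values())
--     return [k for k, v in genrefreq.items() if v == m]
-- ===== Notes on version B (the rewrite author's own statement) =====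
-- stated objective: simpler
-- what changed: Replaces A's single interleaved scan with a -inf sentinel that resets and rebuilds the result list on every new maximum by two plain passes: compute max(values) once, then a list comprehension keeping the keys whose value equals it.
import Mathlib
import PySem

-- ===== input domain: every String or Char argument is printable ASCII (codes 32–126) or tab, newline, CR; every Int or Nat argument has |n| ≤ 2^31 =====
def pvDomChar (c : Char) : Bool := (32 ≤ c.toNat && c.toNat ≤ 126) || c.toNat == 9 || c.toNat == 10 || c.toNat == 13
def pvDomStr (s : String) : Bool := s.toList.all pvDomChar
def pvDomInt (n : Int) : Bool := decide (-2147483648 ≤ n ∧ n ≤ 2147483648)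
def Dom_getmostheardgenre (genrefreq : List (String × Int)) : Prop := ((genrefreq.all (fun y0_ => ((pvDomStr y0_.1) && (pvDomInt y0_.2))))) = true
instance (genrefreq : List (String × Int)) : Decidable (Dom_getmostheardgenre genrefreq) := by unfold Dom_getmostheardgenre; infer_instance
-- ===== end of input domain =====

-- B replaces A's interleaved reset-and-rebuild scan by two plain passes (max, then filter); objective: simpler.

-- ===== PORT A =====
-- A's loop state: mini (none = float('-inf'), smaller than every int) and genrelist.
def getmostheardgenreLoop : List (String × Int) → Option Int → List String → List String
  | [], _, genrelist => genrelist
  | (key, value) :: rest, mini, genrelist =>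
    match mini with
    | none => getmostheardgenreLoop rest (some value) [key]        -- value > -inf: reset list
    | some m =>
      if value > m then getmostheardgenreLoop rest (some value) [key]
      else if value = m then getmostheardgenreLoop rest (some m) (genrelist ++ [key])
      else getmostheardgenreLoop rest (some m) genrelist

def getmostheardgenre (genrefreq : List (String × Int)) : List String :=
  getmostheardgenreLoop genrefreq none []

-- ===== PORT B =====
def getmostheardgenre_alt (genrefreq : List (String × Int)) : List String :=
  if genrefreq = [] then []
  else
    match PySem.List.max? (genrefreq.map Prod.snd) (fun x => x) with
    | none => []
    | some m => (genrefreq.filter (fun p => decide (p.2 = m))).map Prod.fst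

-- ===== PRECONDITION & SPEC =====
def Spec_getmostheardgenre (genrefreq : List (String × Int)) (out : List String) : Prop := out = getmostheardgenre_alt genrefreq
instance (genrefreq : List (String × Int)) (out : List String) : Decidable (Spec_getmostheardgenre genrefreq out) := by unfold Spec_getmostheardgenre; infer_instance

-- ===== CLAIM (what is proved, stated in full; the proofs are below) =====
def Claim_equal_getmostheardgenre : Prop := ∀ (genrefreq : List (String × Int)), Dom_getmostheardgenre genrefreq → Spec_getmostheardgenre genrefreq (getmostheardgenre genrefreq)

-- ===== LEMMAS AND PROOFS =====

-- Characterisation of A's loop after the first element: with current max m and list acc,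
-- the result is acc (kept iff m stays maximal) followed by the keys of rest whose value is the overall max.
theorem getmostheardgenreLoop_char (rest : List (String × Int)) :
    ∀ (m : Int) (acc : List String),
      getmostheardgenreLoop rest (some m) acc =
        (if (rest.map Prod.snd).foldl max m = m then acc else []) ++
          (rest.filter (fun p => decide (p.2 = (rest.map Prod.snd).foldl max m))).map Prod.fst := by
  induction rest with
  | nil => intro m acc; simp [getmostheardgenreLoop]
  | cons hd tl ih =>
    intro m acc
    obtain ⟨k, v⟩ := hd
    have hle : ∀ x : Int, x ≤ (tl.map Prod.snd).foldl max x :=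
      fun x => (PySem.List.le_foldl_max (tl.map Prod.snd) x).1
    by_cases hgt : v > m
    · have hmv : max m v = v := max_eq_right (le_of_lt hgt)
      have hne : (tl.map Prod.snd).foldl max v ≠ m :=
        fun h => absurd (h ▸ hle v) (not_le.mpr hgt)
      simp only [getmostheardgenreLoop, if_pos hgt, ih, List.map_cons, List.foldl_cons, hmv,
        List.filter_cons]
      rw [if_neg hne]
      by_cases hv : v = (tl.map Prod.snd).foldl max v
      · simp [← hv]
      · simp [hv, Ne.symm hv]
    · by_cases heq : v = m
      · subst heq
        have hmv : max v v = v := max_self v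
        simp only [getmostheardgenreLoop, if_neg hgt, ih, List.map_cons,
          List.foldl_cons, hmv, List.filter_cons]
        by_cases hM : (tl.map Prod.snd).foldl max v = v
        · simp [hM]
        · simp [hM, Ne.symm hM]
      · have hlt : v < m := lt_of_le_of_ne (not_lt.mp hgt) heq
        have hmv : max m v = m := max_eq_left (le_of_lt hlt)
        have hne : v ≠ (tl.map Prod.snd).foldl max m := by
          intro h; have hm := hle m; rw [← h] at hm; exact absurd hlt (not_lt.mpr hm)
        simp only [getmostheardgenreLoop, if_neg hgt, if_neg heq, ih, List.map_cons,
          List.foldl_cons, hmv, List.filter_cons]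
        simp [hne]

-- ===== VERDICT (by name: the statement is the Claim_ definition above) =====
theorem getmostheardgenre_spec : Claim_equal_getmostheardgenre := by
  unfold Claim_equal_getmostheardgenre
  intro genrefreq _
  unfold Spec_getmostheardgenre
  cases genrefreq with
  | nil => rfl
  | cons hd tl =>
    obtain ⟨k, v⟩ := hd
    have hmax : PySem.List.max? (((k, v) :: tl).map Prod.snd) (fun x => x) =
        some ((tl.map Prod.snd).foldl max v) := by
      rw [List.map_cons, PySem.List.max?_id_cons]
    simp only [getmostheardgenre, getmostheardgenreLoop, getmostheardgenre_alt,
      reduceCtorEq, if_false, hmax, getmostheardgenreLoop_char, List.filter_cons]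
    by_cases hv : v = (tl.map Prod.snd).foldl max v
    · simp [← hv]
    · simp [hv, Ne.symm hv]
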